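-- pv_equiv track=rewrite | github.com/ss2d22/valencia-spoon-os | backend/src/agents/base_tribunal_agent.py | _extract_concerns
-- ===== SOURCE A (Python) =====
-- from typing import Dict, Any, List
--
-- def _extract_concerns(response: str) -> List[Dict[str, Any]]:
--     concerns = []
--     lines = response.split('\n')
--     current_concern = None
--
--     for line in lines:
--         line = line.strip()
--         if line.startswith(('-', '*', '1.', '2.', '3.', '4.', '5.')):
--             if current_concern:
--                 concerns.append(current_concern)
--             current_concern = {
--                 "title": line.lstrip('-*0123456789. '),
--                 "evidence": "",
--                 "severity": "UNKNOWN"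
--             }
--         elif current_concern and line:
--             current_concern["evidence"] += line + " "
--
--     if current_concern:
--         concerns.append(current_concern)
--
--     return concerns
-- ===== SOURCE B (Python) =====
-- from typing import Dict, Any, List
--
-- def _extract_concerns(response: str) -> List[Dict[str, Any]]:
--     # B: strip all lines up front, then cut the line list into marker-headed
--     # segments (index scan to the next marker) instead of A's single stateful pass.
--     markers = ('-', '*', '1.', '2.', '3.', '4.', '5.')
--     lines = [ln.strip() for ln in response.split('\n')]
--     n = len(lines)
--     concerns = []
--     i = 0
--     while i < n and not lines[i].startswith(markers):
--         i += 1
--     while i < n: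
--         j = i + 1
--         while j < n and not lines[j].startswith(markers):
--             j += 1
--         body = lines[i + 1:j]
--         concerns.append({
--             "title": lines[i].lstrip('-*0123456789. '),
--             "evidence": ''.join(ln + ' ' for ln in body if ln),
--             "severity": "UNKNOWN",
--         })
--         i = j
--     return concerns
-- ===== Notes on version B (the rewrite author's own statement) =====
-- stated objective: alternative
-- what changed: Replaces A's single stateful scan carrying a mutable current-concern dict with a two-phase decomposition: strip all lines up front, then cut the line list at bullet-marker boundaries and build each concern from its whole segment at once.
import Mathlib
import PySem

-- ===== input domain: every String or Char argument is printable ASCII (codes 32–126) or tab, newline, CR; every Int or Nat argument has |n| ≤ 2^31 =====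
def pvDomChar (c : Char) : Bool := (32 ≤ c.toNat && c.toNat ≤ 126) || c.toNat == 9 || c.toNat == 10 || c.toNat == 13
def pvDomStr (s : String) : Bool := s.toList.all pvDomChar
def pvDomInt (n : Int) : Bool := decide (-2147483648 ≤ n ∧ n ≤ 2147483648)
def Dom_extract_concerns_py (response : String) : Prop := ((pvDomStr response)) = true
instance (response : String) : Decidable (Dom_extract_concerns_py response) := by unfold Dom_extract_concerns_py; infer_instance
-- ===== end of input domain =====

-- B replaces A's stateful scan by a strip-all-lines pass plus a segment cut at marker boundaries (objective: alternative decomposition).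

-- shared one-liners both Pythons contain verbatim
-- line.startswith(('-', '*', '1.', '2.', '3.', '4.', '5.'))
def pvMarker (l : String) : Bool :=
  PySem.Str.startswith l "-" || PySem.Str.startswith l "*" || PySem.Str.startswith l "1." ||
  PySem.Str.startswith l "2." || PySem.Str.startswith l "3." || PySem.Str.startswith l "4." ||
  PySem.Str.startswith l "5."

-- hand port of s.lstrip('-*0123456789. '): drop leading chars of the set (exact: Python lstrip(chars) removes exactly the leading characters contained in chars)
def pvTitle (l : String) : String :=
  String.ofList (l.toList.dropWhile (fun c => "-*0123456789. ".toList.contains c))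

def pvMk (t e : String) : List (String × String) :=
  [("title", t), ("evidence", e), ("severity", "UNKNOWN")]

-- ===== PORT A =====
-- current_concern["evidence"] += line + " "  (in-place update of the dict entry)
def pvUpdEv (c : List (String × String)) (l : String) : List (String × String) :=
  c.map (fun kv => if kv.1 == "evidence" then (kv.1, kv.2 ++ l ++ " ") else kv)

def pvStepA (st : List (List (String × String)) × Option (List (String × String)))
    (line : String) : List (List (String × String)) × Option (List (String × String)) :=
  let line := PySem.Str.strip line
  if pvMarker line then
    (match st.2 with
     | some c => st.1 ++ [c]
     | none => st.1,
     some (pvMk (pvTitle line) ""))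
  else
    match st.2 with
    | some c => if line ≠ "" then (st.1, some (pvUpdEv c line)) else st
    | none => st

def pvFinalA (st : List (List (String × String)) × Option (List (String × String))) :
    List (List (String × String)) :=
  match st.2 with
  | some c => st.1 ++ [c]
  | none => st.1

def extract_concerns_py (response : String) : List (List (String × String)) :=
  let lines := (PySem.Str.split? response "\n").getD []
  pvFinalA (lines.foldl pvStepA ([], none))

-- ===== PORT B =====
-- ''.join(ln + ' ' for ln in body if ln)
def pvEvJoin (body : List String) : String :=
  PySem.Str.join "" ((body.filter (fun x => x ≠ "")).map (fun x => x ++ " "))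

-- the outer while: each step takes the marker line and scans forward to the next marker
def pvSegs : List String → List (List (String × String))
  | [] => []
  | l :: ls =>
    pvMk (pvTitle l) (pvEvJoin (ls.takeWhile (fun x => !pvMarker x)))
      :: pvSegs (ls.dropWhile (fun x => !pvMarker x))
termination_by ls => ls.length
decreasing_by
  simp only [List.length_cons]
  exact Nat.lt_succ_of_le (List.length_dropWhile_le _ _)

def extract_concerns_py_alt (response : String) : List (List (String × String)) :=
  let lines := ((PySem.Str.split? response "\n").getD []).map PySem.Str.strip
  pvSegs (lines.dropWhile (fun x => !pvMarker x))

-- ===== PRECONDITION & SPEC =====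
def Spec_extract_concerns_py (response : String) (out : List (List (String × String))) : Prop := out = extract_concerns_py_alt response
instance (response : String) (out : List (List (String × String))) : Decidable (Spec_extract_concerns_py response out) := by unfold Spec_extract_concerns_py; infer_instance

-- ===== CLAIM (what is proved, stated in full; the proofs are below) =====
def Claim_equal_extract_concerns_py : Prop := ∀ (response : String), Dom_extract_concerns_py response → Spec_extract_concerns_py response (extract_concerns_py response)

-- ===== LEMMAS AND PROOFS =====

theorem pvUpdEv_mk (t e l : String) : pvUpdEv (pvMk t e) l = pvMk t (e ++ l ++ " ") := by
  simp [pvUpdEv, pvMk]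

theorem pvMarker_empty : pvMarker "" = false := by decide

theorem pvSegs_nil : pvSegs [] = [] := by rw [pvSegs.eq_def]

theorem pvSegs_cons (l : String) (ls : List String) :
    pvSegs (l :: ls)
      = pvMk (pvTitle l) (pvEvJoin (ls.takeWhile (fun x => !pvMarker x)))
          :: pvSegs (ls.dropWhile (fun x => !pvMarker x)) := by
  rw [pvSegs.eq_def]

theorem pvJoinE (x : String) (xs : List String) :
    PySem.Str.join "" (x :: xs) = x ++ PySem.Str.join "" xs := by
  apply String.toList_inj.mp
  cases xs with
  | nil => simp [PySem.Chars.join_singleton, PySem.Chars.join_nil]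
  | cons b rest => simp [PySem.Chars.join_cons_cons]

theorem pvEvJoin_nil : pvEvJoin [] = "" := by
  simp [pvEvJoin, PySem.Str.join, PySem.Chars.join_nil]

theorem pvEvJoin_cons (l : String) (body : List String) :
    pvEvJoin (l :: body) = (if l = "" then "" else l ++ " ") ++ pvEvJoin body := by
  by_cases h : l = "" <;> simp [pvEvJoin, h, pvJoinE]

theorem pvGofold (ls : List String) (acc : List (List (String × String))) (t e : String) :
    pvFinalA (ls.foldl pvStepA (acc, some (pvMk t e)))
      = acc ++ (pvMk t (e ++ pvEvJoin ((ls.map PySem.Str.strip).takeWhile (fun x => !pvMarker x)))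
          :: pvSegs ((ls.map PySem.Str.strip).dropWhile (fun x => !pvMarker x))) := by
  induction ls generalizing acc t e with
  | nil => simp [pvFinalA, pvEvJoin_nil, pvSegs_nil]
  | cons l ls ih =>
    simp only [List.foldl_cons, List.map_cons]
    by_cases hm : pvMarker (PySem.Str.strip l) = true
    · rw [show pvStepA (acc, some (pvMk t e)) l
            = (acc ++ [pvMk t e], some (pvMk (pvTitle (PySem.Str.strip l)) "")) by
          simp [pvStepA, hm]]
      rw [ih]
      rw [List.takeWhile_cons_of_neg (by simp [hm]), List.dropWhile_cons_of_neg (by simp [hm]),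
          pvSegs_cons]
      simp [pvEvJoin_nil]
    · by_cases he : PySem.Str.strip l = ""
      · rw [show pvStepA (acc, some (pvMk t e)) l = (acc, some (pvMk t e)) by
            simp [pvStepA, he, pvMarker_empty]]
        rw [ih]
        rw [List.takeWhile_cons_of_pos (by simp [he, pvMarker_empty]),
            List.dropWhile_cons_of_pos (by simp [he, pvMarker_empty])]
        simp [pvEvJoin_cons, he]
      · rw [show pvStepA (acc, some (pvMk t e)) l
              = (acc, some (pvMk t (e ++ PySem.Str.strip l ++ " "))) by
            simp [pvStepA, hm, he, pvUpdEv_mk]]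
        rw [ih]
        rw [List.takeWhile_cons_of_pos (by simp [hm]), List.dropWhile_cons_of_pos (by simp [hm])]
        simp [pvEvJoin_cons, he, String.append_assoc]

theorem pvPrefold (ls : List String) :
    pvFinalA (ls.foldl pvStepA ([], none))
      = pvSegs ((ls.map PySem.Str.strip).dropWhile (fun x => !pvMarker x)) := by
  induction ls with
  | nil => simp [pvFinalA, pvSegs_nil]
  | cons l ls ih =>
    simp only [List.foldl_cons, List.map_cons]
    by_cases hm : pvMarker (PySem.Str.strip l) = true
    · rw [show pvStepA (([], none) : List (List (String × String)) × Option (List (String × String))) l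
            = ([], some (pvMk (pvTitle (PySem.Str.strip l)) "")) by
          simp [pvStepA, hm]]
      rw [pvGofold]
      rw [List.dropWhile_cons_of_neg (by simp [hm]), pvSegs_cons]
      simp
    · rw [show pvStepA (([], none) : List (List (String × String)) × Option (List (String × String))) l
            = ([], none) by
          simp [pvStepA, hm]]
      rw [ih, List.dropWhile_cons_of_pos (by simp [hm])]

-- ===== VERDICT (by name: the statement is the Claim_ definition above) =====
theorem extract_concerns_py_spec : Claim_equal_extract_concerns_py := by
  intro response _
  unfold Spec_extract_concerns_py
  exact pvPrefold ((PySem.Str.split? response "\n").getD [])
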